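-- pv_equiv track=rewrite | github.com/vamsikrishna07/Amazon-OA | dominoesGetMaxPoints.py | solve
-- ===== SOURCE A (Python) =====
-- def solve(domino, remove, min_order):
--     n = len(domino)
--     removed_at = [0] * n
--     dp = [0] * n
--
--     for i in range(n):
--         removed_at[remove[i]] = i
--
--     def length_of_lis(moves):
--         ans = 0
--         for i in range(n):
--             if removed_at[i] < moves:
--                 continue
--             x = domino[i]
--             left, right = -1, ans
--             while right - left > 1:
--                 mid = (right + left) // 2
--                 if dp[mid] >= x:
--                     right = mid
--                 else:
--                     left = mid
--             dp[right] = x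
--             ans = max(ans, right + 1)
--         return ans
--
--     if length_of_lis(0) < min_order:
--         return -1
--
--     left, right = 0, n
--     while right - left > 1:
--         mid = (right + left) // 2
--         if length_of_lis(mid) >= min_order:
--             left = mid
--         else:
--             right = mid
--
--     return left
-- ===== SOURCE B (Python) =====
-- def solve(domino, remove, min_order):
--     n = len(domino)
--     removed_at = [0] * n
--     for i in range(n):
--         removed_at[remove[i]] = i
--
--     def lis_at(moves):
--         tails = []
--         for i in range(n):
--             if removed_at[i] >= moves:
--                 x = domino[i]
--                 pos = 0
--                 while pos < len(tails) and tails[pos] < x: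
--                     pos += 1
--                 if pos == len(tails):
--                     tails.append(x)
--                 else:
--                     tails[pos] = x
--         return len(tails)
--
--     if lis_at(0) < min_order:
--         return -1
--
--     best = 0
--     for moves in range(1, n):
--         if lis_at(moves) < min_order:
--             break
--         best = moves
--     return best
-- ===== Notes on version B (the rewrite author's own statement) =====
-- stated objective: simpler
-- what changed: Replaces the preallocated shared dp array with an inner binary search and the outer bisection by a grown tails list with linear insertion-position scan and a linear upward scan over moves that stops at the first failure; correctness of the scan rests on monotonicity of the LIS length in moves.
import Mathlib
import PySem

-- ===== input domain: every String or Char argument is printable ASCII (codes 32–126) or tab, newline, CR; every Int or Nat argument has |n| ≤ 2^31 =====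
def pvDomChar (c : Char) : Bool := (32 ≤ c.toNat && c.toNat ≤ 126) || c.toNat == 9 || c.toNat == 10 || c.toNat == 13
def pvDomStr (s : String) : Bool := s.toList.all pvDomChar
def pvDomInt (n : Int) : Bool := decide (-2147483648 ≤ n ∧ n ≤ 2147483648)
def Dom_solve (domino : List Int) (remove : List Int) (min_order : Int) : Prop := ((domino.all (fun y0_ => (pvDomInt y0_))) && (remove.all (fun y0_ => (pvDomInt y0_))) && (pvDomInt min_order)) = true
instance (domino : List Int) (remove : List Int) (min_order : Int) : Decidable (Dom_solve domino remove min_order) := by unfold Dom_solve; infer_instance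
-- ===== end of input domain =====

-- B replaces A's shared dp array + inner binary search + outer bisection by a grown tails
-- list with a linear insertion-position scan and a linear upward scan over moves (objective: simpler).

-- both Pythons build removed_at by the identical first loop: removed_at[remove[i]] = i
def removedAtOf (remove : List Int) (n : Nat) : List Int :=
  (List.range n).foldl
    (fun ra i => PySem.List.pySetD ra (PySem.List.pyGetD remove (i : Int) 0) (i : Int))
    (List.replicate n 0)

-- ===== PORT A =====
-- the inner `while right - left > 1` binary search of length_of_lis (returns final (left, right))
def bsearchA (dp : List Int) (x : Int) (left right : Int) : Int × Int :=
  if _h : right - left > 1 then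
    let mid := PySem.Int.floordiv (right + left) 2
    if PySem.List.pyGetD dp mid 0 ≥ x then bsearchA dp x left mid
    else bsearchA dp x mid right
  else (left, right)
termination_by (right - left).toNat
decreasing_by
  all_goals
    have h1 := (PySem.Int.le_floordiv_iff_mul_le (a := right + left) (b := 2) (q := left + 1) (by omega)).mpr (by omega)
    have h2 := (PySem.Int.floordiv_lt_iff_lt_mul (a := right + left) (b := 2) (q := right) (by omega)).mpr (by omega)
    omega

-- one iteration of `for i in range(n)` inside length_of_lis; state = (ans, dp)
def lisStepA (domino removed_at : List Int) (moves : Int) (st : Int × List Int) (i : Nat) : Int × List Int :=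
  if PySem.List.pyGetD removed_at (i : Int) 0 < moves then st
  else
    let x := PySem.List.pyGetD domino (i : Int) 0
    let r := (bsearchA st.2 x (-1) st.1).2
    (max st.1 (r + 1), PySem.List.pySetD st.2 r x)

-- length_of_lis(moves), with the module-level dp threaded through (returns (ans, dp'))
def lisA (domino removed_at : List Int) (moves : Int) (dp : List Int) : Int × List Int :=
  (List.range domino.length).foldl (lisStepA domino removed_at moves) (0, dp)

-- the outer `while right - left > 1` bisection of solve (dp threaded; returns final left)
def solveLoopA (domino removed_at : List Int) (min_order : Int) (dp : List Int) (left right : Int) : Int :=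
  if _h : right - left > 1 then
    let mid := PySem.Int.floordiv (right + left) 2
    let p := lisA domino removed_at mid dp
    if p.1 ≥ min_order then solveLoopA domino removed_at min_order p.2 mid right
    else solveLoopA domino removed_at min_order p.2 left mid
  else left
termination_by (right - left).toNat
decreasing_by
  all_goals
    have h1 := (PySem.Int.le_floordiv_iff_mul_le (a := right + left) (b := 2) (q := left + 1) (by omega)).mpr (by omega)
    have h2 := (PySem.Int.floordiv_lt_iff_lt_mul (a := right + left) (b := 2) (q := right) (by omega)).mpr (by omega)
    omega

def solve (domino : List Int) (remove : List Int) (min_order : Int) : Int :=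
  let n := domino.length
  let removed_at := removedAtOf remove n
  let dp0 : List Int := List.replicate n 0
  let r0 := lisA domino removed_at 0 dp0
  if r0.1 < min_order then -1
  else solveLoopA domino removed_at min_order r0.2 0 (n : Int)

-- ===== PORT B =====
-- `pos = 0; while pos < len(tails) and tails[pos] < x: pos += 1`
def posB (tails : List Int) (x : Int) : Nat :=
  match tails with
  | [] => 0
  | t :: ts => if t < x then posB ts x + 1 else 0

-- `if pos == len(tails): tails.append(x) else: tails[pos] = x`
def insB (tails : List Int) (x : Int) : List Int :=
  let p := posB tails x
  if p = tails.length then tails ++ [x] else tails.set p x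

-- lis_at(moves): grow tails over i in range(n), return len(tails)
def lisB (domino removed_at : List Int) (moves : Int) : Int :=
  (((List.range domino.length).foldl
    (fun (tails : List Int) (i : Nat) =>
      if PySem.List.pyGetD removed_at (i : Int) 0 ≥ moves then
        insB tails (PySem.List.pyGetD domino (i : Int) 0)
      else tails) []).length : Int)

-- `for moves in range(1, n): if lis_at(moves) < min_order: break; best = moves`
def scanB (domino removed_at : List Int) (min_order : Int) (best : Int) (ms : List Int) : Int :=
  match ms with
  | [] => best
  | m :: rest =>
    if lisB domino removed_at m < min_order then best
    else scanB domino removed_at min_order m rest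

def solve_alt (domino : List Int) (remove : List Int) (min_order : Int) : Int :=
  let n := domino.length
  let removed_at := removedAtOf remove n
  if lisB domino removed_at 0 < min_order then -1
  else scanB domino removed_at min_order 0 (PySem.List.pyRange 1 (n : Int) 1)

-- ===== PRECONDITION & SPEC =====
-- Pre_ excludes exactly the IndexError inputs: remove must supply at least len(domino) entries,
-- each a valid (possibly negative) Python index into the length-n removed_at array.
def Pre_solve (domino : List Int) (remove : List Int) (min_order : Int) : Prop :=
  domino.length ≤ remove.length ∧
  ∀ x ∈ remove.take domino.length, -(domino.length : Int) ≤ x ∧ x < (domino.length : Int)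

instance (domino : List Int) (remove : List Int) (min_order : Int) : Decidable (Pre_solve domino remove min_order) := by
  unfold Pre_solve; infer_instance

def pvWitness_solve : List Int × List Int × Int := ([3, 1, 2], [1, 0, 2], 2)

def Spec_solve (domino : List Int) (remove : List Int) (min_order : Int) (out : Int) : Prop := out = solve_alt domino remove min_order
instance (domino : List Int) (remove : List Int) (min_order : Int) (out : Int) : Decidable (Spec_solve domino remove min_order out) := by unfold Spec_solve; infer_instance

-- ===== CLAIM (what is proved, stated in full; the proofs are below) =====
def Claim_equal_solve : Prop := ∀ (domino : List Int) (remove : List Int) (min_order : Int), Dom_solve domino remove min_order → Pre_solve domino remove min_order → Spec_solve domino remove min_order (solve domino remove min_order)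

-- ===== LEMMAS AND PROOFS =====

-- ---- posB characterisation ----
theorem posB_le_length (t : List Int) (x : Int) : posB t x ≤ t.length := by
  induction t with
  | nil => simp [posB]
  | cons a ts ih => simp only [posB]; split <;> simp <;> omega

theorem posB_lt (t : List Int) (x : Int) {j : Nat} (hj : j < posB t x) :
    t.getD j 0 < x := by
  induction t generalizing j with
  | nil => simp [posB] at hj
  | cons a ts ih =>
    simp only [posB] at hj
    split at hj
    · cases j with
      | zero => simpa using ‹a < x›
      | succ j => exact ih (by omega)
    · omega

theorem posB_get (t : List Int) (x : Int) (h : posB t x < t.length) :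
    x ≤ t.getD (posB t x) 0 := by
  induction t with
  | nil => simp at h
  | cons a ts ih =>
    by_cases hax : a < x
    · simp only [posB, if_pos hax] at h ⊢
      simpa using ih (by simpa using Nat.lt_of_succ_lt_succ (by simpa using h))
    · simp only [posB, if_neg hax]
      simpa using le_of_not_gt hax

-- sorted lists: getD is monotone in the index
theorem sorted_getD {t : List Int} (hs : t.Pairwise (· ≤ ·)) {i j : Nat}
    (hij : i ≤ j) (hj : j < t.length) : t.getD i 0 ≤ t.getD j 0 := by
  rcases eq_or_lt_of_le hij with rfl | hlt
  · exact le_refl _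
  · have hi : i < t.length := lt_trans hlt hj
    rw [List.getD_eq_getElem t 0 hi, List.getD_eq_getElem t 0 hj]
    exact List.pairwise_iff_getElem.mp hs i j hi hj hlt

-- ---- insB facts ----
theorem length_insB (t : List Int) (x : Int) :
    (insB t x).length = if posB t x = t.length then t.length + 1 else t.length := by
  simp only [insB]; split <;> simp

theorem getD_insB (t : List Int) (x : Int) (j : Nat) (hj : j < (insB t x).length) :
    (insB t x).getD j 0 = if j = posB t x then x else t.getD j 0 := by
  have hple := posB_le_length t x
  simp only [insB] at hj ⊢
  by_cases hp : posB t x = t.length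
  · simp only [if_pos hp] at hj ⊢
    simp only [List.length_append, List.length_singleton] at hj
    by_cases hjp : j = posB t x
    · subst hjp
      rw [if_pos rfl, List.getD_eq_getElem _ _ (by simp; omega)]
      rw [List.getElem_append_right (by omega)]
      simp [hp]
    · rw [if_neg hjp]
      have hjlt : j < t.length := by omega
      rw [List.getD_eq_getElem _ _ (by simp; omega), List.getElem_append_left hjlt,
        List.getD_eq_getElem _ _ hjlt]
  · simp only [if_neg hp] at hj ⊢
    simp only [List.length_set] at hj
    rw [List.getD_eq_getElem _ _ (by simpa using hj), List.getElem_set,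
      List.getD_eq_getElem _ _ hj]
    by_cases hjp : j = posB t x
    · simp [hjp]
    · simp [hjp, Ne.symm hjp]

theorem sorted_insB {t : List Int} (hs : t.Pairwise (· ≤ ·)) (x : Int) :
    (insB t x).Pairwise (· ≤ ·) := by
  have hple := posB_le_length t x
  rw [List.pairwise_iff_getElem]
  intro i j hi hj hij
  have hgi : (insB t x)[i] = (insB t x).getD i 0 := (List.getD_eq_getElem _ _ hi).symm
  have hgj : (insB t x)[j] = (insB t x).getD j 0 := (List.getD_eq_getElem _ _ hj).symm
  rw [hgi, hgj, getD_insB t x i hi, getD_insB t x j hj]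
  have hlen : (insB t x).length = if posB t x = t.length then t.length + 1 else t.length :=
    length_insB t x
  by_cases hip : i = posB t x
  · by_cases hjp : j = posB t x
    · omega
    · -- x ≤ t.getD j 0 : j > posB, so j < t.length and t[j] ≥ t[posB] ≥ x or j beyond
      rw [if_pos hip, if_neg hjp]
      have hjt : j < t.length := by
        by_cases hp : posB t x = t.length <;> simp [hp] at hlen <;> omega
      have hpt : posB t x < t.length := by omega
      exact le_trans (posB_get t x hpt) (sorted_getD hs (by omega) hjt)
  · by_cases hjp : j = posB t x
    · -- t.getD i 0 ≤ x : i < posB so t[i] < x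
      rw [if_neg hip, if_pos hjp]
      exact le_of_lt (posB_lt t x (by omega))
    · rw [if_neg hip, if_neg hjp]
      have hjt : j < t.length := by
        by_cases hp : posB t x = t.length
        · simp [hp] at hlen; omega
        · simp [hp] at hlen; omega
      exact sorted_getD hs (le_of_lt hij) hjt

-- ---- domination (monotonicity of the patience structure) ----
def dominates (s t : List Int) : Prop :=
  s.length ≤ t.length ∧ ∀ j < s.length, t.getD j 0 ≤ s.getD j 0

theorem dominates_cons {a b : Int} {s t : List Int} (h : dominates (a :: s) (b :: t)) :
    b ≤ a ∧ dominates s t := by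
  obtain ⟨hl, hv⟩ := h
  exact ⟨by simpa using hv 0 (by simp),
    by simpa using hl,
    fun j hj => by
      simpa [List.getD_cons_succ] using hv (j + 1) (by simpa using Nat.succ_lt_succ hj)⟩

theorem posB_mono {s t : List Int} (h : dominates s t) (x : Int) :
    posB s x ≤ posB t x := by
  induction s generalizing t with
  | nil => simp [posB]
  | cons a s' ih =>
    cases t with
    | nil => simp [dominates] at h
    | cons b t' =>
      obtain ⟨hba, hst⟩ := dominates_cons h
      simp only [posB]
      by_cases hax : a < x
      · rw [if_pos hax, if_pos (lt_of_le_of_lt hba hax)]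
        exact Nat.succ_le_succ (ih hst)
      · rw [if_neg hax]; omega

theorem getD_insB_le (t : List Int) (x : Int) (j : Nat) (hj : j < t.length) :
    (insB t x).getD j 0 ≤ t.getD j 0 := by
  have hlen := length_insB t x
  rw [getD_insB t x j (by by_cases hp : posB t x = t.length <;> simp [hp] at hlen <;> omega)]
  by_cases hjp : j = posB t x
  · rw [if_pos hjp]
    subst hjp
    exact posB_get t x hj
  · rw [if_neg hjp]

theorem dominates_insB_right {s t : List Int} (h : dominates s t) (x : Int) :
    dominates s (insB t x) := by
  obtain ⟨hl, hv⟩ := h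
  have hlen := length_insB t x
  constructor
  · by_cases hp : posB t x = t.length <;> simp [hp] at hlen <;> omega
  · intro j hj
    exact le_trans (getD_insB_le t x j (by omega)) (hv j hj)

theorem dominates_insB {s t : List Int} (h : dominates s t) (x : Int) :
    dominates (insB s x) (insB t x) := by
  obtain ⟨hl, hv⟩ := h
  have hps := posB_le_length s x
  have hpt := posB_le_length t x
  have hmono := posB_mono ⟨hl, hv⟩ x
  have hlens := length_insB s x
  have hlent := length_insB t x
  constructor
  · by_cases hp : posB s x = s.length
    · by_cases hq : posB t x = t.length
      · simp [hp, hq] at hlens hlent; omega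
      · simp [hp, hq] at hlens hlent
        -- posB t x ≥ posB s x = s.length, posB t x < t.length, so t.length > s.length
        omega
    · simp [hp] at hlens
      by_cases hq : posB t x = t.length <;> simp [hq] at hlent <;> omega
  · intro j hj
    have hjs : j < (insB s x).length := hj
    have hjt : j < (insB t x).length := by
      by_cases hp : posB s x = s.length <;> by_cases hq : posB t x = t.length <;>
        simp [hp, hq] at hlens hlent <;> omega
    rw [getD_insB s x j hjs, getD_insB t x j hjt]
    by_cases hjp : j = posB s x
    · by_cases hjq : j = posB t x
      · rw [if_pos hjp, if_pos hjq]
      · -- j = posB s ≤ posB t, j ≠ posB t, so j < posB t : t side is t.getD j < x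
        rw [if_pos hjp, if_neg hjq]
        exact le_of_lt (posB_lt t x (by omega))
    · by_cases hjq : j = posB t x
      · -- j = posB t, j ≠ posB s : since posB s ≤ posB t = j and j ≠ posB s, posB s < j ≤ len s?
        -- value: x ≤ t.getD j ≤ s.getD j  (t[posB t] ≥ x and t[j] ≤ s[j])
        rw [if_neg hjp, if_pos hjq]
        have hjlens : j < s.length := by
          by_cases hp : posB s x = s.length <;> simp [hp] at hlens <;> omega
        calc x ≤ t.getD j 0 := by
                rw [hjq]; exact posB_get t x (by omega)
          _ ≤ s.getD j 0 := hv j hjlens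
      · rw [if_neg hjp, if_neg hjq]
        have hjlens : j < s.length := by
          by_cases hp : posB s x = s.length <;> simp [hp] at hlens <;> omega
        exact hv j hjlens

theorem foldB_dominates (domino removed_at : List Int) {m m' : Int} (h : m ≤ m') :
    ∀ (is : List Nat) (s t : List Int), dominates s t →
      dominates
        (is.foldl (fun (tails : List Int) (i : Nat) =>
          if PySem.List.pyGetD removed_at (i : Int) 0 ≥ m' then
            insB tails (PySem.List.pyGetD domino (i : Int) 0) else tails) s)
        (is.foldl (fun (tails : List Int) (i : Nat) =>
          if PySem.List.pyGetD removed_at (i : Int) 0 ≥ m then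
            insB tails (PySem.List.pyGetD domino (i : Int) 0) else tails) t) := by
  intro is
  induction is with
  | nil => intro s t hst; simpa using hst
  | cons i rest ih =>
    intro s t hst
    simp only [List.foldl_cons]
    by_cases h1 : PySem.List.pyGetD removed_at (i : Int) 0 ≥ m'
    · rw [if_pos h1, if_pos (le_trans h h1)]
      exact ih _ _ (dominates_insB hst _)
    · rw [if_neg h1]
      by_cases h2 : PySem.List.pyGetD removed_at (i : Int) 0 ≥ m
      · rw [if_pos h2]
        exact ih _ _ (dominates_insB_right hst _)
      · rw [if_neg h2]
        exact ih _ _ hst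

theorem lisB_antitone (domino removed_at : List Int) {m m' : Int} (h : m ≤ m') :
    lisB domino removed_at m' ≤ lisB domino removed_at m := by
  have hdom := foldB_dominates domino removed_at h (List.range domino.length) [] []
    ⟨le_refl _, by simp⟩
  unfold lisB
  exact_mod_cast hdom.1

-- ---- A's binary search finds posB on a sorted prefix ----
theorem bsearchA_eq (dp t : List Int) (x : Int) (hs : t.Pairwise (· ≤ ·))
    (htake : dp.take t.length = t) :
    ∀ g (left right : Int), (right - left).toNat ≤ g →
      -1 ≤ left → left < (posB t x : Int) → (posB t x : Int) ≤ right →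
      right ≤ (t.length : Int) →
      (bsearchA dp x left right).2 = (posB t x : Int) := by
  have hlen : t.length ≤ dp.length := by
    have := congrArg List.length htake
    simp at this
    omega
  have hread : ∀ j : Nat, j < t.length → dp.getD j 0 = t.getD j 0 := by
    intro j hj
    conv_rhs => rw [← htake]
    rw [List.getD_eq_getElem _ _ (by omega), List.getD_eq_getElem _ _ (by simp; omega)]
    exact List.getElem_take.symm
  intro g
  induction g with
  | zero =>
    intro left right hg h1 h2 h3 h4
    rw [bsearchA]
    rw [dif_neg (by omega)]
    omega
  | succ g ih =>
    intro left right hg h1 h2 h3 h4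
    rw [bsearchA]
    by_cases hgt : right - left > 1
    · rw [dif_pos hgt]
      have hm1 : left + 1 ≤ PySem.Int.floordiv (right + left) 2 :=
        (PySem.Int.le_floordiv_iff_mul_le (by omega)).mpr (by omega)
      have hm2 : PySem.Int.floordiv (right + left) 2 < right :=
        (PySem.Int.floordiv_lt_iff_lt_mul (by omega)).mpr (by omega)
      set mid := PySem.Int.floordiv (right + left) 2 with hmid
      have hmid0 : 0 ≤ mid := by omega
      have hmidlt : mid.toNat < t.length := by omega
      have hgetmid : PySem.List.pyGetD dp mid 0 = t.getD mid.toNat 0 := by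
        rw [PySem.List.pyGetD_eq_getElem dp 0 hmid0 (by push_cast; omega)]
        rw [← List.getD_eq_getElem dp 0 (by omega)]
        exact hread mid.toNat hmidlt
      by_cases hc : PySem.List.pyGetD dp mid 0 ≥ x
      · rw [if_pos hc]
        have hple : posB t x ≤ mid.toNat := by
          by_contra hlt
          have := posB_lt t x (j := mid.toNat) (by omega)
          rw [← hgetmid] at this
          omega
        exact ih left mid (by omega) h1 h2 (by omega) (by omega)
      · rw [if_neg hc]
        have hplt : mid.toNat < posB t x := by
          by_contra hge
          have hpl : posB t x < t.length := by omega
          have h5 := posB_get t x hpl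
          have h6 := sorted_getD hs (i := posB t x) (j := mid.toNat) (by omega) hmidlt
          rw [← hgetmid] at h6
          omega
        exact ih mid right (by omega) (by omega) (by omega) h3 h4
    · rw [dif_neg hgt]
      omega

-- ---- the A-state / B-tails invariant ----
theorem AB_inv (domino removed_at : List Int) (m : Int) :
    ∀ k, k ≤ domino.length → ∀ dp : List Int, dp.length = domino.length →
      (((List.range k).foldl (lisStepA domino removed_at m) (0, dp)).1 =
        (((List.range k).foldl
          (fun (tails : List Int) (i : Nat) =>
            if PySem.List.pyGetD removed_at (i : Int) 0 ≥ m then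
              insB tails (PySem.List.pyGetD domino (i : Int) 0)
            else tails) []).length : Int)) ∧
      ((List.range k).foldl (lisStepA domino removed_at m) (0, dp)).2.length = domino.length ∧
      ((List.range k).foldl (lisStepA domino removed_at m) (0, dp)).2.take
          ((List.range k).foldl
            (fun (tails : List Int) (i : Nat) =>
              if PySem.List.pyGetD removed_at (i : Int) 0 ≥ m then
                insB tails (PySem.List.pyGetD domino (i : Int) 0)
              else tails) []).length =
        ((List.range k).foldl
          (fun (tails : List Int) (i : Nat) =>
            if PySem.List.pyGetD removed_at (i : Int) 0 ≥ m then
              insB tails (PySem.List.pyGetD domino (i : Int) 0)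
            else tails) []) ∧
      ((List.range k).foldl
        (fun (tails : List Int) (i : Nat) =>
          if PySem.List.pyGetD removed_at (i : Int) 0 ≥ m then
            insB tails (PySem.List.pyGetD domino (i : Int) 0)
          else tails) []).length ≤ k ∧
      ((List.range k).foldl
        (fun (tails : List Int) (i : Nat) =>
          if PySem.List.pyGetD removed_at (i : Int) 0 ≥ m then
            insB tails (PySem.List.pyGetD domino (i : Int) 0)
          else tails) []).Pairwise (· ≤ ·) := by
  intro k
  induction k with
  | zero =>
    intro _ dp hdp
    exact ⟨by simp, by simpa using hdp, by simp, by simp, by simp⟩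
  | succ k ih =>
    intro hk dp hdp
    obtain ⟨h1, h2, h3, h4, h5⟩ := ih (by omega) dp hdp
    rw [List.range_succ]
    simp only [List.foldl_append, List.foldl_cons, List.foldl_nil]
    set stk := (List.range k).foldl (lisStepA domino removed_at m) (0, dp) with hstk
    set tk := (List.range k).foldl
      (fun (tails : List Int) (i : Nat) =>
        if PySem.List.pyGetD removed_at (i : Int) 0 ≥ m then
          insB tails (PySem.List.pyGetD domino (i : Int) 0)
        else tails) [] with htk
    by_cases hcond : PySem.List.pyGetD removed_at (k : Int) 0 < m
    · rw [lisStepA, if_pos hcond, if_neg (by omega)]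
      exact ⟨h1, h2, h3, by omega, h5⟩
    · rw [if_pos (le_of_not_gt hcond)]
      set x := PySem.List.pyGetD domino (k : Int) 0 with hx
      set p := posB tk x with hp
      have hple := posB_le_length tk x
      have hlen2 : stk.2.length = domino.length := h2
      have hr : (bsearchA stk.2 x (-1) stk.1).2 = (p : Int) := by
        rw [h1]
        refine bsearchA_eq stk.2 tk x h5 h3 (tk.length + 2) (-1)
          (tk.length : Int) (by omega) (by omega) (by omega) (by exact_mod_cast hple)
          (le_refl _)
      have hstep : lisStepA domino removed_at m stk k =
          (max stk.1 ((p : Int) + 1), PySem.List.pySetD stk.2 (p : Int) x) := by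
        rw [lisStepA, if_neg hcond]
        show (max stk.1 ((bsearchA stk.2 x (-1) stk.1).2 + 1),
            PySem.List.pySetD stk.2 (bsearchA stk.2 x (-1) stk.1).2 x) =
          (max stk.1 ((p : Int) + 1), PySem.List.pySetD stk.2 (p : Int) x)
        rw [hr]
      rw [hstep]
      have hlb : tk.length ≤ k := h4
      have hkn : k < domino.length := by omega
      refine ⟨?_, ?_, ?_, ?_, sorted_insB h5 x⟩
      · rw [h1, length_insB]
        by_cases hpl : p = tk.length
        · rw [if_pos hpl, hpl]; push_cast; omega
        · rw [if_neg hpl]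
          have : p < tk.length := by omega
          push_cast; omega
      · rw [PySem.List.pySetD_natCast, List.length_set, h2]
      · rw [PySem.List.pySetD_natCast, length_insB]
        by_cases hpl : p = tk.length
        · rw [if_pos hpl, insB, if_pos (hp ▸ hpl)]
          rw [hpl]
          rw [List.take_add_one, List.take_set,
            List.set_eq_of_length_le (by simp), h3,
            List.getElem?_set_self (by omega)]
          simp
        · rw [if_neg hpl, insB, if_neg (hp ▸ hpl)]
          rw [List.take_set, h3]
      · rw [length_insB]
        split <;> omega

theorem lisA_fst (domino removed_at : List Int) (m : Int) (dp : List Int)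
    (hdp : dp.length = domino.length) :
    (lisA domino removed_at m dp).1 = lisB domino removed_at m := by
  have h := AB_inv domino removed_at m domino.length (le_refl _) dp hdp
  exact h.1

theorem lisA_len (domino removed_at : List Int) (m : Int) (dp : List Int)
    (hdp : dp.length = domino.length) :
    (lisA domino removed_at m dp).2.length = domino.length := by
  have h := AB_inv domino removed_at m domino.length (le_refl _) dp hdp
  exact h.2.1

-- ---- outer search: both sides compute the greatest good number of moves ----
theorem solveLoopA_eq (domino removed_at : List Int) (min_order : Int)
    (hn : 1 ≤ domino.length) :
    ∀ g (left right : Int) (dp : List Int), dp.length = domino.length →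
      (right - left).toNat ≤ g → 0 ≤ left → left < right → right ≤ (domino.length : Int) →
      min_order ≤ lisB domino removed_at left →
      (right = (domino.length : Int) ∨ ¬ min_order ≤ lisB domino removed_at right) →
      solveLoopA domino removed_at min_order dp left right =
        (Nat.findGreatest (fun k => min_order ≤ lisB domino removed_at (k : Int))
          (domino.length - 1) : Int) := by
  intro g
  induction g with
  | zero =>
    intro left right dp hdp hg h0 hlr hrn hPl hR
    omega
  | succ g ih =>
    intro left right dp hdp hg h0 hlr hrn hPl hR
    rw [solveLoopA]
    by_cases hgt : right - left > 1
    · rw [dif_pos hgt]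
      have hm1 : left + 1 ≤ PySem.Int.floordiv (right + left) 2 :=
        (PySem.Int.le_floordiv_iff_mul_le (by omega)).mpr (by omega)
      have hm2 : PySem.Int.floordiv (right + left) 2 < right :=
        (PySem.Int.floordiv_lt_iff_lt_mul (by omega)).mpr (by omega)
      set mid := PySem.Int.floordiv (right + left) 2 with hmid
      have hfst : (lisA domino removed_at mid dp).1 = lisB domino removed_at mid :=
        lisA_fst domino removed_at mid dp hdp
      have hlen : (lisA domino removed_at mid dp).2.length = domino.length :=
        lisA_len domino removed_at mid dp hdp
      by_cases hc : (lisA domino removed_at mid dp).1 ≥ min_order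
      · rw [if_pos hc]
        exact ih mid right _ hlen (by omega) (by omega) (by omega) hrn
          (by rw [hfst] at hc; exact hc) hR
      · rw [if_neg hc]
        exact ih left mid _ hlen (by omega) h0 (by omega) (by omega) hPl
          (Or.inr (by rw [hfst] at hc; omega))
    · rw [dif_neg hgt]
      have hPlN : min_order ≤ lisB domino removed_at ((left.toNat : Nat) : Int) := by
        have : ((left.toNat : Nat) : Int) = left := by omega
        rw [this]; exact hPl
      have hlef : left.toNat ≤ domino.length - 1 := by omega
      have hle1 : left.toNat ≤
          Nat.findGreatest (fun k => min_order ≤ lisB domino removed_at (k : Int))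
            (domino.length - 1) :=
        Nat.le_findGreatest hlef hPlN
      have hge : Nat.findGreatest (fun k => min_order ≤ lisB domino removed_at (k : Int))
          (domino.length - 1) ≤ left.toNat := by
        rcases hR with h | h
        · have := Nat.findGreatest_le
            (P := fun k => min_order ≤ lisB domino removed_at (k : Int))
            (domino.length - 1)
          omega
        · by_contra hlt
          have hPF : min_order ≤ lisB domino removed_at
              ((Nat.findGreatest (fun k => min_order ≤ lisB domino removed_at (k : Int))
                (domino.length - 1) : Nat) : Int) :=
            Nat.findGreatest_spec (P := fun k => min_order ≤ lisB domino removed_at (k : Int)) hlef hPlN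
          exact h (le_trans hPF (lisB_antitone domino removed_at (by omega)))
      omega

theorem scanB_eq (domino removed_at : List Int) (min_order : Int) :
    ∀ g (a : Nat), 1 ≤ a → a ≤ domino.length → domino.length - a ≤ g →
      min_order ≤ lisB domino removed_at ((a : Int) - 1) →
      scanB domino removed_at min_order ((a : Int) - 1)
          (PySem.List.pyRange (a : Int) (domino.length : Int) 1) =
        (Nat.findGreatest (fun k => min_order ≤ lisB domino removed_at (k : Int))
          (domino.length - 1) : Int) := by
  have haux : ∀ a : Nat, 1 ≤ a → a ≤ domino.length →
      min_order ≤ lisB domino removed_at ((a : Int) - 1) →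
      (a = domino.length ∨ ¬ min_order ≤ lisB domino removed_at (a : Int)) →
      ((a : Int) - 1) =
        (Nat.findGreatest (fun k => min_order ≤ lisB domino removed_at (k : Int))
          (domino.length - 1) : Int) := by
    intro a h1 h2 hP hna
    have hPm : min_order ≤ lisB domino removed_at (((a - 1 : Nat) : Nat) : Int) := by
      have : (((a - 1 : Nat) : Nat) : Int) = (a : Int) - 1 := by omega
      rw [this]; exact hP
    have hle : a - 1 ≤
        Nat.findGreatest (fun k => min_order ≤ lisB domino removed_at (k : Int))
          (domino.length - 1) :=
      Nat.le_findGreatest (by omega) hPm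
    have hFle := Nat.findGreatest_le
      (P := fun k => min_order ≤ lisB domino removed_at (k : Int)) (domino.length - 1)
    have hge : Nat.findGreatest (fun k => min_order ≤ lisB domino removed_at (k : Int))
        (domino.length - 1) ≤ a - 1 := by
      rcases hna with h | h
      · omega
      · by_contra hlt
        have hPF : min_order ≤ lisB domino removed_at
            ((Nat.findGreatest (fun k => min_order ≤ lisB domino removed_at (k : Int))
              (domino.length - 1) : Nat) : Int) :=
          Nat.findGreatest_spec
            (P := fun k => min_order ≤ lisB domino removed_at (k : Int)) (by omega) hPm
        exact h (le_trans hPF (lisB_antitone domino removed_at (by omega)))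
    omega
  intro g
  induction g with
  | zero =>
    intro a h1 h2 hg hP
    have han : a = domino.length := by omega
    rw [han] at hP ⊢
    rw [PySem.List.pyRange_one_eq_nil (le_refl _)]
    exact haux domino.length (by omega) (le_refl _) hP (Or.inl rfl)
  | succ g ih =>
    intro a h1 h2 hg hP
    by_cases han : a = domino.length
    · rw [han] at hP ⊢
      rw [PySem.List.pyRange_one_eq_nil (le_refl _)]
      exact haux domino.length (by omega) (le_refl _) hP (Or.inl rfl)
    · rw [PySem.List.pyRange_one_cons (by exact_mod_cast (by omega : a < domino.length))]
      by_cases hc : lisB domino removed_at (a : Int) < min_order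
      · show (if lisB domino removed_at (a : Int) < min_order then (a : Int) - 1 else _) = _
        rw [if_pos hc]
        exact haux a h1 (by omega) hP (Or.inr (by omega))
      · show (if lisB domino removed_at (a : Int) < min_order then (a : Int) - 1 else
          scanB domino removed_at min_order (a : Int)
            (PySem.List.pyRange ((a : Int) + 1) (domino.length : Int) 1)) = _
        rw [if_neg hc]
        have h := ih (a + 1) (by omega) (by omega) (by omega)
          (by push_cast; simpa using le_of_not_gt hc)
        push_cast at h
        simpa using h

-- ===== VERDICT (by name: the statement is the Claim_ definition above) =====
theorem solve_spec : Claim_equal_solve := by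
  intro domino remove min_order _hdom _hpre
  unfold Spec_solve
  simp only [solve, solve_alt]
  set ra := removedAtOf remove domino.length with hra
  have hdp0 : (List.replicate domino.length (0 : Int)).length = domino.length := by simp
  have hfst := lisA_fst domino ra 0 _ hdp0
  have hlen := lisA_len domino ra 0 _ hdp0
  rw [hfst]
  by_cases hc : lisB domino ra 0 < min_order
  · rw [if_pos hc, if_pos hc]
  · rw [if_neg hc, if_neg hc]
    by_cases hz : domino.length = 0
    · have h0 : ((domino.length : Nat) : Int) = 0 := by exact_mod_cast hz
      rw [solveLoopA, dif_neg (by omega)]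
      rw [PySem.List.pyRange_one_eq_nil (by omega)]
      rfl
    · rw [solveLoopA_eq domino ra min_order (by omega)
        ((domino.length : Int) - 0).toNat 0 (domino.length : Int) _ hlen (by omega)
        (by omega) (by exact_mod_cast Nat.pos_of_ne_zero hz) (by omega)
        (by omega) (Or.inl rfl)]
      have h2 := scanB_eq domino ra min_order domino.length 1 (by omega)
        (by omega) (by omega) (by norm_num; omega)
      simpa using h2.symm
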